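-- pv_equiv track=rewrite | github.com/miliar/Code_Jam_Webscraper | solutions_python/Problem_156/522.py | splitbiggest
-- ===== SOURCE A (Python) =====
-- import copy
--
-- def splitbiggest(lst):
--     l = copy.deepcopy(lst)
--     big = max(l)
--     num = l.count(big)
--     for x in range(0, num):
--         l.remove(big)
--         l.append(big//2)
--         l.append(big - big//2)
--     return l
--
-- x = 2
-- ===== SOURCE B (Python) =====
-- def splitbiggest(lst):
--     big = max(lst)
--     out = [x for x in lst if x != big]
--     num = len(lst) - len(out)
--     half = big // 2
--     out.extend([half, big - half] * num)
--     return out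
-- ===== Notes on version B (the rewrite author's own statement) =====
-- stated objective: faster
-- what changed: A repeatedly calls list.remove(big) inside a loop (each remove rescans the list); B makes one filter pass to drop the max elements and appends num copies of the (big//2, big-big//2) pair.
-- outside the precondition, e.g. on splitbiggest([]): A raises ValueError, B raises ValueError
import Mathlib
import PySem

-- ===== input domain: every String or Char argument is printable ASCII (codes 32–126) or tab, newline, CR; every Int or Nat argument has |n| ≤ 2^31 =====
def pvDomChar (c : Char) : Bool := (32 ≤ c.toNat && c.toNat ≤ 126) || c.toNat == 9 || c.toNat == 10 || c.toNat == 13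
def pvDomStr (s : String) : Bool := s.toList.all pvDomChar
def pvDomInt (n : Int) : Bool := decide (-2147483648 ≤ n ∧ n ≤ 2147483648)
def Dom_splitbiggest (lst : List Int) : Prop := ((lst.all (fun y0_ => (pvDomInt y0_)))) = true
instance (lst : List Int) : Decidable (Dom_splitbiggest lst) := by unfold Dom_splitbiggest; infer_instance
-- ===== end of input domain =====

-- B replaces A's quadratic remove/append loop by one filter pass plus `num` appended half-pairs (single pass instead of repeated list.remove scans).

-- ===== PORT A =====
-- one loop body: l.remove(big); l.append(big//2); l.append(big - big//2)
-- (under Pre_ big is always present, so the `.getD` default branch is never taken)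
def splitbiggestStep (big : Int) (l : List Int) : List Int :=
  ((PySem.List.remove? l big).getD l)
    ++ [PySem.Int.floordiv big 2, big - PySem.Int.floordiv big 2]

def splitbiggest (lst : List Int) : List Int :=
  match PySem.List.max? lst (fun x => x) with
  | none => []   -- max([]) raises ValueError; excluded by Pre_
  | some big =>
    let num := PySem.List.count lst big
    (PySem.List.pyRange 0 (num : Int) 1).foldl (fun acc _ => splitbiggestStep big acc) lst

-- ===== PORT B =====
def splitbiggest_alt (lst : List Int) : List Int :=
  match PySem.List.max? lst (fun x => x) with
  | none => []   -- max([]) raises ValueError; excluded by Pre_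
  | some big =>
    let out := lst.filter (fun x => decide (x ≠ big))
    let num := lst.length - out.length
    let half := PySem.Int.floordiv big 2
    out ++ (List.replicate num [half, big - half]).flatten

-- ===== PRECONDITION & SPEC =====
-- A (and B) raise ValueError on max([]) for the empty list; nothing else raises.
def Pre_splitbiggest (lst : List Int) : Prop := lst ≠ []
instance (lst : List Int) : Decidable (Pre_splitbiggest lst) := by unfold Pre_splitbiggest; infer_instance
def pvWitness_splitbiggest : List Int := ([5, 3, 5] : List Int)

def Spec_splitbiggest (lst : List Int) (out : List Int) : Prop := out = splitbiggest_alt lst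
instance (lst : List Int) (out : List Int) : Decidable (Spec_splitbiggest lst out) := by unfold Spec_splitbiggest; infer_instance

-- ===== CLAIM (what is proved, stated in full; the proofs are below) =====
def Claim_equal_splitbiggest : Prop := ∀ (lst : List Int), Dom_splitbiggest lst → Pre_splitbiggest lst → Spec_splitbiggest lst (splitbiggest lst)

-- ===== LEMMAS AND PROOFS =====

-- folding a function that ignores the elements is just iteration
lemma foldl_const_iterate {α β : Type} (l : List β) (g : α → α) (init : α) :
    l.foldl (fun acc _ => g acc) init = g^[l.length] init := by
  induction l generalizing init with
  | nil => rfl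
  | cons x t ih => simp [List.foldl, ih, Function.iterate_succ_apply]

lemma iterate_erase_cons (big x : Int) (hx : x ≠ big) :
    ∀ (n : Nat) (xs : List Int),
      (fun m : List Int => m.erase big)^[n] (x :: xs) = x :: (fun m : List Int => m.erase big)^[n] xs := by
  intro n
  induction n with
  | zero => intro xs; rfl
  | succ n ih =>
    intro xs
    rw [Function.iterate_succ_apply, Function.iterate_succ_apply]
    simp only [List.erase_cons, beq_iff_eq]
    rw [if_neg hx, ih]

lemma iterate_erase_count_eq_filter (big : Int) :
    ∀ l : List Int,
      (fun m : List Int => m.erase big)^[l.count big] l = l.filter (fun x => decide (x ≠ big)) := by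
  intro l
  induction l with
  | nil => rfl
  | cons x t ih =>
    by_cases hx : x = big
    · subst hx
      rw [List.count_cons_self, Function.iterate_succ_apply]
      simp only [List.erase_cons_head]
      rw [ih]
      simp [List.filter]
    · rw [List.count_cons_of_ne (by simpa using hx), iterate_erase_cons big x hx, ih]
      simp [List.filter, hx]

-- loop invariant: after k of the `num` iterations, the first k occurrences of big are
-- erased from the original part and k half-pairs are appended at the end
lemma step_iterate_inv (big : Int) :
    ∀ (k : Nat) (l0 t : List Int), k ≤ l0.count big →
      (splitbiggestStep big)^[k] (l0 ++ t)
        = (fun m : List Int => m.erase big)^[k] l0 ++ t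
            ++ (List.replicate k [PySem.Int.floordiv big 2, big - PySem.Int.floordiv big 2]).flatten := by
  intro k
  induction k with
  | zero => intro l0 t _; simp
  | succ k ih =>
    intro l0 t hk
    have hmem : big ∈ l0 := by
      rw [← List.count_pos_iff]; omega
    rw [Function.iterate_succ_apply]
    have hstep : splitbiggestStep big (l0 ++ t)
        = l0.erase big ++ (t ++ [PySem.Int.floordiv big 2, big - PySem.Int.floordiv big 2]) := by
      unfold splitbiggestStep
      rw [PySem.List.remove?_eq_some_erase (l0 ++ t) big (List.mem_append_left t hmem)]
      rw [Option.getD_some, List.erase_append_left _ hmem, List.append_assoc]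
    rw [hstep, ih (l0.erase big) _ (by rw [List.count_erase_self]; omega)]
    rw [Function.iterate_succ_apply]
    simp [List.replicate_succ, List.append_assoc]

lemma count_eq_length_sub (big : Int) (l : List Int) :
    l.count big = l.length - (l.filter (fun x => decide (x ≠ big))).length := by
  induction l with
  | nil => rfl
  | cons x t ih =>
    by_cases hx : x = big
    · rw [hx, List.count_cons_self]
      have hle : (t.filter (fun x => decide (x ≠ big))).length ≤ t.length := List.length_filter_le _ _
      simp [List.filter, ih]
      simp only [ne_eq, decide_not] at hle
      omega
    · rw [List.count_cons_of_ne (by simpa using hx)]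
      simp [List.filter, hx, ih]

-- ===== VERDICT (by name: the statement is the Claim_ definition above) =====
theorem splitbiggest_spec : Claim_equal_splitbiggest := by
  intro lst _ hpre
  unfold Spec_splitbiggest splitbiggest splitbiggest_alt
  obtain ⟨big, hbig⟩ : ∃ b, PySem.List.max? lst (fun x => x) = some b := by
    cases h : PySem.List.max? lst (fun x => x) with
    | none => exact absurd ((PySem.List.max?_eq_none_iff lst (fun x => x)).mp h) hpre
    | some b => exact ⟨b, rfl⟩
  rw [hbig]
  simp only
  have hlen : (PySem.List.pyRange 0 ((PySem.List.count lst big : Nat) : Int) 1).length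
      = PySem.List.count lst big := by
    rw [PySem.List.length_pyRange_one]; omega
  have hcnt : PySem.List.count lst big = lst.count big := PySem.List.count_eq lst big
  rw [foldl_const_iterate, hlen, hcnt]
  have hinv := step_iterate_inv big (lst.count big) lst [] (le_refl _)
  rw [List.append_nil] at hinv
  rw [hinv, iterate_erase_count_eq_filter, count_eq_length_sub]
  simp
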